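-- pv_equiv track=rewrite | github.com/MrBrantCode/unitest_baseline | mut_generate/mist_train_cf/cf_47781/solution.py | is_ambigram
-- ===== SOURCE A (Python) =====
-- def is_ambigram(input_string):
--     ambigram_chars = {'h':'y', 'n':'u', 's':'s', 'z':'z', 'x':'x', 'o':'o', 'p':'q', 'b':'d', 'd':'p', 'q':'b', 'u':'n', 'y':'h', 'i':'i', '1':'1', '0':'0', '8':'8'}
--
--     input_string = input_string.lower()
--     reversed_string = input_string[::-1]
--
--     for i in range(len(input_string)):
--         if input_string[i] not in ambigram_chars or ambigram_chars[input_string[i]] != reversed_string[i]: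
--             return False
--
--     return True
-- ===== SOURCE B (Python) =====
-- def is_ambigram(input_string):
--     m = {'h':'y', 'n':'u', 's':'s', 'z':'z', 'x':'x', 'o':'o', 'p':'q', 'b':'d', 'd':'p', 'q':'b', 'u':'n', 'y':'h', 'i':'i', '1':'1', '0':'0', '8':'8'}
--     s = input_string.lower()
--     i, j = 0, len(s) - 1
--     while i <= j:
--         if m.get(s[i]) != s[j] or m.get(s[j]) != s[i]:
--             return False
--         i += 1
--         j -= 1
--     return True
-- ===== Notes on version B (the rewrite author's own statement) =====
-- stated objective: alternative
-- what changed: Replaces A's reversed-string construction plus full-length index scan with two converging pointers that validate each mirror pair once, checking the mapping in both directions (the table is not an involution, so A's full scan is exactly a mutual-pair check).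
import Mathlib
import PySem

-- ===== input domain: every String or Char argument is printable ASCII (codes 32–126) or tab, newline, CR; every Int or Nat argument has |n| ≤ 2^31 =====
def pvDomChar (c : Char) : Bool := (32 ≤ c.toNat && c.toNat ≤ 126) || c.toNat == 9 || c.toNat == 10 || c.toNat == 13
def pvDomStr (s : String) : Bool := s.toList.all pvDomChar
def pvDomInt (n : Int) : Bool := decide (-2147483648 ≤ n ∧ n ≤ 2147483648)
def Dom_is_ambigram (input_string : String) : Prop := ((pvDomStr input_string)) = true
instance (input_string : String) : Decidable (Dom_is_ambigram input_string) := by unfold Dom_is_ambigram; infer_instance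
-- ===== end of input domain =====

-- B drops A's reversed-string construction and full-length scan: two converging pointers
-- check each mirror pair once, in both directions (alternative decomposition, same cost class).

-- ===== PORT A =====
def ambDict : PySem.Dict Char Char := PySem.Dict.ofList
  [('h','y'), ('n','u'), ('s','s'), ('z','z'), ('x','x'), ('o','o'), ('p','q'), ('b','d'),
   ('d','p'), ('q','b'), ('u','n'), ('y','h'), ('i','i'), ('1','1'), ('0','0'), ('8','8')]

-- for i in range(len(input_string)): if s[i] not in d or d[s[i]] != rev[i]: return False
def ambLoopA (s rev : List Char) (i : Nat) : Bool :=
  if i < s.length then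
    if !(ambDict.contains (s.getD i ' ')) || !(ambDict.get? (s.getD i ' ') == some (rev.getD i ' ')) then
      false
    else ambLoopA s rev (i + 1)
  else true
termination_by s.length - i

def is_ambigram (input_string : String) : Bool :=
  let s := (PySem.Str.lower input_string).toList
  -- input_string[::-1]  (PySem.List.slice? s none none (-1) = some s.reverse)
  let rev := s.reverse
  ambLoopA s rev 0

-- ===== PORT B =====
-- while i <= j: if m.get(s[i]) != s[j] or m.get(s[j]) != s[i]: return False; i += 1; j -= 1
def ambLoopB (s : List Char) (i j : Int) : Bool :=
  if i ≤ j then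
    match PySem.List.pyGet? s i, PySem.List.pyGet? s j with
    | some ci, some cj =>
      if !(ambDict.get? ci == some cj) || !(ambDict.get? cj == some ci) then false
      else ambLoopB s (i + 1) (j - 1)
    | _, _ => false   -- unreachable: the loop keeps 0 ≤ i ≤ j < len
  else true
termination_by (j + 1 - i).toNat
decreasing_by omega

def is_ambigram_alt (input_string : String) : Bool :=
  let s := (PySem.Str.lower input_string).toList
  ambLoopB s 0 ((s.length : Int) - 1)

-- ===== PRECONDITION & SPEC =====
def Spec_is_ambigram (input_string : String) (out : Bool) : Prop := out = is_ambigram_alt input_string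
instance (input_string : String) (out : Bool) : Decidable (Spec_is_ambigram input_string out) := by unfold Spec_is_ambigram; infer_instance

-- ===== CLAIM (what is proved, stated in full; the proofs are below) =====
def Claim_equal_is_ambigram : Prop := ∀ (input_string : String), Dom_is_ambigram input_string → Spec_is_ambigram input_string (is_ambigram input_string)

-- ===== LEMMAS AND PROOFS =====

-- A's loop condition passes at i iff the dict maps s[i] to rev[i].
theorem ambCondA (c r : Char) :
    (!(ambDict.contains c) || !(ambDict.get? c == some r)) = true ↔ ambDict.get? c ≠ some r := by
  cases h : ambDict.get? c with
  | none =>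
      have hc : ambDict.contains c = false :=
        (PySem.Dict.get?_eq_none_iff_contains ambDict c).mp h
      simp [hc]
  | some v =>
      have hc : ambDict.contains c = true := by
        rcases hb : ambDict.contains c with _ | _
        · exact absurd h (by simp [(PySem.Dict.get?_eq_none_iff_contains ambDict c).mpr hb])
        · rfl
      simp [hc]

theorem ambLoopA_iff (s rev : List Char) (i : Nat) :
    ambLoopA s rev i = true ↔
      ∀ k : Nat, i ≤ k → k < s.length →
        ambDict.get? (s.getD k ' ') = some (rev.getD k ' ') := by
  fun_induction ambLoopA s rev i with
  | case1 i h hcond =>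
      simp only [Bool.false_eq_true, false_iff]
      intro hall
      exact ((ambCondA _ _).mp hcond) (hall i le_rfl h)
  | case2 i h hcond ih =>
      rw [ih]
      constructor
      · intro hall k hik hk
        rcases Nat.eq_or_lt_of_le hik with rfl | hlt
        · have hcond' : ¬ (ambDict.get? (s.getD i ' ') ≠ some (rev.getD i ' ')) :=
            fun hne => hcond ((ambCondA _ _).mpr hne)
          exact of_not_not hcond'
        · exact hall k hlt hk
      · intro hall k hik hk
        exact hall k (Nat.le_of_succ_le hik) hk
  | case3 i h =>
      simp only [true_iff]
      intro k hik hk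
      omega

theorem ambLoopB_iff (s : List Char) (i j : Int) (hi : 0 ≤ i) (hj : j < (s.length : Int)) :
    ambLoopB s i j = true ↔
      ∀ k : Int, i ≤ k → 2 * k ≤ i + j →
        ambDict.get? (s.getD k.toNat ' ') = some (s.getD (i + j - k).toNat ' ') ∧
        ambDict.get? (s.getD (i + j - k).toNat ' ') = some (s.getD k.toNat ' ') := by
  rw [ambLoopB]
  by_cases h : i ≤ j
  · have hii : i.toNat < s.length := by omega
    have hjj : j.toNat < s.length := by omega
    have hgi : PySem.List.pyGet? s i = some (s.getD i.toNat ' ') := by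
      rw [PySem.List.pyGet?_of_nonneg s hi, List.getElem?_eq_getElem hii,
        List.getD_eq_getElem s ' ' hii]
    have hgj : PySem.List.pyGet? s j = some (s.getD j.toNat ' ') := by
      rw [PySem.List.pyGet?_of_nonneg s (by omega), List.getElem?_eq_getElem hjj,
        List.getD_eq_getElem s ' ' hjj]
    rw [if_pos h, hgi, hgj]
    dsimp only
    by_cases hc : ambDict.get? (s.getD i.toNat ' ') = some (s.getD j.toNat ' ') ∧
        ambDict.get? (s.getD j.toNat ' ') = some (s.getD i.toNat ' ')
    · have hcb : (!(ambDict.get? (s.getD i.toNat ' ') == some (s.getD j.toNat ' ')) ||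
          !(ambDict.get? (s.getD j.toNat ' ') == some (s.getD i.toNat ' '))) = false := by
        rw [hc.1, hc.2]
        simp
      rw [hcb]
      simp only [Bool.false_eq_true, if_false]
      rw [ambLoopB_iff s (i + 1) (j - 1) (by omega) (by omega)]
      constructor
      · intro hrec k hk1 hk2
        rcases eq_or_lt_of_le hk1 with rfl | hlt
        · have e1 : (i + j - i).toNat = j.toNat := by omega
          rw [e1]
          exact hc
        · have e2 : i + 1 + (j - 1) = i + j := by ring
          have := hrec k (by omega) (by omega)
          rwa [e2] at this
      · intro hall k hk1 hk2
        have e2 : i + 1 + (j - 1) = i + j := by ring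
        rw [e2]
        exact hall k (by omega) (by omega)
    · have hcb : (!(ambDict.get? (s.getD i.toNat ' ') == some (s.getD j.toNat ' ')) ||
          !(ambDict.get? (s.getD j.toNat ' ') == some (s.getD i.toNat ' '))) = true := by
        simp only [Bool.or_eq_true, Bool.not_eq_true', beq_eq_false_iff_ne, ne_eq]
        exact not_and_or.mp hc
      rw [hcb]
      simp only [if_true, Bool.false_eq_true, false_iff]
      intro hall
      have := hall i le_rfl (by omega)
      have e1 : (i + j - i).toNat = j.toNat := by omega
      rw [e1] at this
      exact hc this
  · rw [if_neg h]
    simp only [true_iff]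
    intro k hk1 hk2
    exact absurd hk2 (by omega)
termination_by (j + 1 - i).toNat
decreasing_by omega

-- the common characterisation both loops reduce to, and their agreement
theorem main_eq (s : List Char) :
    ambLoopA s s.reverse 0 = ambLoopB s 0 ((s.length : Int) - 1) := by
  rw [Bool.eq_iff_iff, ambLoopA_iff, ambLoopB_iff s 0 ((s.length : Int) - 1) le_rfl (by omega)]
  have hrev : ∀ k, k < s.length → s.reverse.getD k ' ' = s.getD (s.length - 1 - k) ' ' := by
    intro k hk
    rw [List.getD_eq_getElem?_getD, List.getD_eq_getElem?_getD, List.getElem?_reverse hk]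
  constructor
  · intro hA k hk0 hk2
    have ha : k.toNat < s.length := by omega
    have hb : s.length - 1 - k.toNat < s.length := by omega
    have eb : (0 + ((s.length : Int) - 1) - k).toNat = s.length - 1 - k.toNat := by omega
    have ebb : s.length - 1 - (s.length - 1 - k.toNat) = k.toNat := by omega
    have e1 := hA k.toNat (Nat.zero_le _) ha
    have e2 := hA (s.length - 1 - k.toNat) (Nat.zero_le _) hb
    rw [hrev _ ha] at e1
    rw [hrev _ hb, ebb] at e2
    rw [eb]
    exact ⟨e1, e2⟩
  · intro hB k _ hk
    rw [hrev _ hk]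
    by_cases hhalf : 2 * k + 1 ≤ s.length
    · have h1 := (hB (k : Int) (by omega) (by omega)).1
      have e1 : ((k : Int)).toNat = k := by omega
      have e2 : (0 + ((s.length : Int) - 1) - (k : Int)).toNat = s.length - 1 - k := by omega
      rwa [e1, e2] at h1
    · have hk2 : 2 * (s.length - 1 - k) ≤ s.length - 1 := by omega
      have h1 := (hB ((s.length - 1 - k : Nat) : Int) (by omega) (by omega)).2
      have e1 : (((s.length - 1 - k : Nat) : Int)).toNat = s.length - 1 - k := by omega
      have e2 : (0 + ((s.length : Int) - 1) - ((s.length - 1 - k : Nat) : Int)).toNat = k := by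
        omega
      rwa [e1, e2] at h1

-- ===== VERDICT (by name: the statement is the Claim_ definition above) =====
theorem is_ambigram_spec : Claim_equal_is_ambigram := by
  intro input_string _
  unfold Spec_is_ambigram is_ambigram is_ambigram_alt
  exact main_eq _
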